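-- pv_equiv track=rewrite | github.com/timofurrer/advent-of-code | year_2017/day_09/solution_part_2.py | count_garbage
-- ===== SOURCE A (Python) =====
-- def count_garbage(stream: str) -> int:
--     """
--     Count the garbage in the stream
--     """
--     level = 0
--     garbage = 0
--     in_garbage = False
--     i = 0
--     while i < len(stream):
--         char = stream[i]
--
--         if in_garbage:
--             if char == '!':
--                 i += 1
--             elif char == '>':
--                 in_garbage = False
--             else:
--                 garbage += 1
--         else:
--             if char == '{':
--                 level += 1
--             elif char == '}':
--                 level -= 1
--             elif char == '<':
--                 in_garbage = True
--
--         i += 1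
--
--     return garbage
-- ===== SOURCE B (Python) =====
-- def count_garbage(stream: str) -> int:
--     """
--     Count the garbage in the stream
--     """
--     it = iter(stream)
--     total = 0
--     for c in it:
--         if c == '<':
--             for c in it:
--                 if c == '!':
--                     next(it, None)
--                 elif c == '>':
--                     break
--                 else:
--                     total += 1
--     return total
-- ===== Notes on version B (the rewrite author's own statement) =====
-- stated objective: faster
-- what changed: Replaces the single index-driven automaton with an in_garbage flag and an (unused) nesting level by two nested for-loops over one shared iterator: the outer loop skips to each garbage opener, the inner loop consumes the garbage block counting its characters; no index arithmetic, no mode flag, no level counter.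
import Mathlib
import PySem

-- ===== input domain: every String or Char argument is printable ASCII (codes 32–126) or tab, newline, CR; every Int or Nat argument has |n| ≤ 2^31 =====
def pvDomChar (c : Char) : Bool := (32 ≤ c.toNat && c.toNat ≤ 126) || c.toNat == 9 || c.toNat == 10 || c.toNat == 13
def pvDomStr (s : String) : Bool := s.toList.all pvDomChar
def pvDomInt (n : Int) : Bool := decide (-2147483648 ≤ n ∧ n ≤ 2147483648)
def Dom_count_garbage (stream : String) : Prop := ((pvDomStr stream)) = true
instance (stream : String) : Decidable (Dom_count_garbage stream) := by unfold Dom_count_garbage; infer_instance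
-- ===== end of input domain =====

-- B replaces A's single-loop automaton (in_garbage flag + unused level counter) with two
-- nested loops over one shared iterator: simpler, same O(n) cost.

-- ===== PORT A =====
-- A's while-loop over index i, as the obvious recursion over the remaining characters
-- (i += 1 = move to the tail; the '!' branch's extra i += 1 = drop one more character,
-- or end the loop if none is left).
def aLoop : List Char → Int → Int → Bool → Int
  | [], _, garbage, _ => garbage
  | c :: rest, level, garbage, in_garbage =>
    if in_garbage then
      if c = '!' then
        match rest with
        | [] => garbage
        | _ :: rest2 => aLoop rest2 level garbage in_garbage
      else if c = '>' then aLoop rest level garbage false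
      else aLoop rest level (garbage + 1) in_garbage
    else
      if c = '{' then aLoop rest (level + 1) garbage in_garbage
      else if c = '}' then aLoop rest (level - 1) garbage in_garbage
      else if c = '<' then aLoop rest level garbage true
      else aLoop rest level garbage in_garbage

def count_garbage (stream : String) : Int := aLoop stream.toList 0 0 false

-- ===== PORT B =====
-- B's inner 'for c in it' garbage loop: returns (total, remaining iterator);
-- next(it, None) after '!' drops one more character (a no-op on an exhausted iterator).
def bGarb : List Char → Int → Int × List Char
  | [], total => (total, [])
  | c :: rest, total =>
    if c = '!' then
      match rest with
      | [] => (total, [])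
      | _ :: rest2 => bGarb rest2 total
    else if c = '>' then (total, rest)
    else bGarb rest (total + 1)

-- the leftover iterator is no longer than the input (used only for bOuter's termination)
theorem bGarb_snd_length_le : ∀ (l : List Char) (t : Int), (bGarb l t).2.length ≤ l.length
  | [], _ => Nat.le_refl _
  | [c], t => by
    simp only [bGarb]
    split_ifs <;> simp
  | c :: d :: rest2, t => by
    simp only [bGarb]
    by_cases h1 : c = '!'
    · rw [if_pos h1]
      exact Nat.le_trans (bGarb_snd_length_le rest2 t) (by simp only [List.length_cons]; omega)
    · rw [if_neg h1]
      by_cases h2 : c = '>'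
      · rw [if_pos h2]; simp only [List.length_cons]; omega
      · rw [if_neg h2]
        exact Nat.le_trans (bGarb_snd_length_le (d :: rest2) (t + 1)) (by simp only [List.length_cons]; omega)

-- B's outer 'for c in it' loop.
def bOuter : List Char → Int → Int
  | [], total => total
  | c :: rest, total =>
    if c = '<' then
      let p := bGarb rest total
      bOuter p.2 p.1
    else bOuter rest total
termination_by l _ => l.length
decreasing_by
  · exact Nat.lt_succ_of_le (bGarb_snd_length_le rest total)
  · exact Nat.lt_succ_of_le (Nat.le_refl _)

def count_garbage_alt (stream : String) : Int := bOuter stream.toList 0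

-- ===== PRECONDITION & SPEC =====
def Spec_count_garbage (stream : String) (out : Int) : Prop := out = count_garbage_alt stream
instance (stream : String) (out : Int) : Decidable (Spec_count_garbage stream out) := by unfold Spec_count_garbage; infer_instance

-- ===== CLAIM (what is proved, stated in full; the proofs are below) =====
def Claim_equal_count_garbage : Prop := ∀ (stream : String), Dom_count_garbage stream → Spec_count_garbage stream (count_garbage stream)

-- ===== LEMMAS AND PROOFS =====

-- In garbage mode, A's loop computes B's inner loop and resumes in normal mode on its leftover.
theorem aLoop_true_eq_bGarb : ∀ (l : List Char) (level garbage : Int),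
    aLoop l level garbage true = aLoop (bGarb l garbage).2 level (bGarb l garbage).1 false
  | [], level, garbage => by simp [aLoop, bGarb]
  | [c], level, garbage => by
    simp only [aLoop, bGarb]
    split_ifs <;> simp [aLoop]
  | c :: d :: rest2, level, garbage => by
    simp only [aLoop, bGarb]
    by_cases h1 : c = '!'
    · rw [if_pos h1, if_pos h1]
      exact aLoop_true_eq_bGarb rest2 level garbage
    · rw [if_neg h1, if_neg h1]
      by_cases h2 : c = '>'
      · simp [h2]
      · rw [if_neg h2, if_neg h2]
        exact aLoop_true_eq_bGarb (d :: rest2) level (garbage + 1)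

-- In normal mode, A's loop computes B's outer loop (the level counter never matters).
theorem aLoop_false_eq_bOuter : ∀ (n : Nat) (l : List Char), l.length ≤ n →
    ∀ (level garbage : Int), aLoop l level garbage false = bOuter l garbage := by
  intro n
  induction n with
  | zero =>
    intro l hl level garbage
    have : l = [] := List.eq_nil_of_length_eq_zero (Nat.le_zero.mp hl)
    subst this; simp [aLoop, bOuter]
  | succ n ih =>
    intro l hl level garbage
    match l with
    | [] => simp [aLoop, bOuter]
    | c :: rest =>
      have hrest : rest.length ≤ n := by simp only [List.length_cons] at hl; omega
      rw [aLoop.eq_def, bOuter]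
      simp only [Bool.false_eq_true, if_false]
      by_cases h1 : c = '{'
      · rw [if_pos h1, if_neg (by rw [h1]; decide)]
        exact ih rest hrest (level + 1) garbage
      · rw [if_neg h1]
        by_cases h2 : c = '}'
        · rw [if_pos h2, if_neg (by rw [h2]; decide)]
          exact ih rest hrest (level - 1) garbage
        · rw [if_neg h2]
          by_cases h3 : c = '<'
          · rw [if_pos h3, if_pos h3]
            rw [aLoop_true_eq_bGarb rest level garbage]
            exact ih _ (Nat.le_trans (bGarb_snd_length_le rest garbage) hrest) level _
          · rw [if_neg h3, if_neg h3]
            exact ih rest hrest level garbage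

-- ===== VERDICT (by name: the statement is the Claim_ definition above) =====
theorem count_garbage_spec : Claim_equal_count_garbage := by
  intro stream _
  unfold Spec_count_garbage count_garbage count_garbage_alt
  exact aLoop_false_eq_bOuter stream.toList.length stream.toList (Nat.le_refl _) 0 0
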